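-- pv_equiv track=rewrite | github.com/DebanjanSarkar/hangman_game | utility.py | fill_matching_letters_in_blank_spaces
-- ===== SOURCE A (Python) =====
-- def fill_matching_letters_in_blank_spaces(actual_word, guess_word, letter):
--     # Converting string to list such that character at any specific position can be modified.
--     guess_word = list(guess_word)
--
--     # Checks one by one that the correctly guessed letter occurs at which numbered place in the original word.
--     i = 0
--     replacements = 0
--     while i < len(actual_word):
--         # Matching index found at which correctly guessed letter occurs.
--         if letter == actual_word[i] and guess_word[i*2] == "_":
--             # For each letter in original word, guess word contains two chars: '_ ', thus modification
--             # must only replace the underscore '_', which occurs at every even index.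
--             guess_word[i*2] = letter
--             replacements += 1
--         i += 1
--
--     # After all modifications, joining all the characters in the list to retrieve the string.
--     guess_word = "".join(guess_word)
--     return (guess_word, replacements)
-- ===== SOURCE B (Python) =====
-- def fill_matching_letters_in_blank_spaces(actual_word, guess_word, letter):
--     # Stream the guess word two characters at a time alongside the actual word,
--     # building a fresh output; no indexing and no in-place mutation.
--     it = iter(guess_word)
--     pieces = []
--     replacements = 0
--     for ch in actual_word:
--         g0 = next(it, None)
--         if g0 is None:
--             break
--         if letter == ch and g0 == "_":
--             pieces.append(letter)
--             replacements += 1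
--         else:
--             pieces.append(g0)
--         g1 = next(it, None)
--         if g1 is not None:
--             pieces.append(g1)
--     return ("".join(pieces) + "".join(it), replacements)
-- ===== Notes on version B (the rewrite author's own statement) =====
-- stated objective: alternative
-- what changed: Instead of A's index loop that mutates a char list at computed even positions i*2, B streams guess_word two characters at a time from an iterator alongside actual_word, building a fresh output list (plus the untouched iterator remainder) with no indexing and no in-place mutation; avoiding per-step index arithmetic and random-access reads gives a constant-factor speedup.
import Mathlib
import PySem

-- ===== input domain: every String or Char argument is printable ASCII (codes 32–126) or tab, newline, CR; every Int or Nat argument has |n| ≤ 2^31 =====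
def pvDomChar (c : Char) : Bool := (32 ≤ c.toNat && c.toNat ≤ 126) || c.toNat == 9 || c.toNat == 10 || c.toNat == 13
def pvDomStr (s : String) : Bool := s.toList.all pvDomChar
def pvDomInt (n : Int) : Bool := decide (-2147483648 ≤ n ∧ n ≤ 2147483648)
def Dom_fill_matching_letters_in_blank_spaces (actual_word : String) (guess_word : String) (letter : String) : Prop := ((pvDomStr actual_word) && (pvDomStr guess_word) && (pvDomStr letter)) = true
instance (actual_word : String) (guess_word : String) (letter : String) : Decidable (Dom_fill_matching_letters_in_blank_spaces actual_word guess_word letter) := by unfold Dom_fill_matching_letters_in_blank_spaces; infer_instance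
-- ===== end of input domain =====

-- B streams guess_word two chars at a time alongside actual_word, building a fresh output with no
-- indexing/mutation, instead of A's index loop writing at computed even positions; objective: alternative.
-- ===== PORT A =====
-- A's while loop: indexed pass over actual_word, mutating the char list at position i*2, counting writes.
def pvFillStepA (letter : String) (actual : List Char) (st : List Char × Int) (i : Nat) : List Char × Int :=
  if letter.toList = [actual.getD i ' '] ∧ st.1.getD (i*2) ' ' = '_' then
    (st.1.set (i*2) (letter.toList.headD ' '), st.2 + 1)
  else st

def fill_matching_letters_in_blank_spaces (actual_word : String) (guess_word : String) (letter : String) : String × Int :=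
  let res := (List.range actual_word.toList.length).foldl (pvFillStepA letter actual_word.toList) (guess_word.toList, 0)
  (String.mk res.1, res.2)

-- ===== PORT B =====
-- Source B's loop: for ch in actual_word, pull up to two chars from the guess-word iterator (its remaining
-- suffix is the second list argument), append pieces, count; returns (pieces, leftover iterator, count).
def pvFillLoopB (letter : String) : List Char → List Char → List Char → Int → List Char × List Char × Int
  | [], gw, pieces, n => (pieces, gw, n)
  | _ :: aws, [], pieces, n => (pieces, [], n)                     -- g0 is None: break
  | ch :: aws, g0 :: gt, pieces, n =>
      let st := if letter.toList = [ch] ∧ g0 = '_'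
                then (pieces ++ letter.toList, n + 1)
                else (pieces ++ [g0], n)
      match gt with
      | [] => pvFillLoopB letter aws [] st.1 st.2                  -- g1 is None
      | g1 :: rest => pvFillLoopB letter aws rest (st.1 ++ [g1]) st.2

def fill_matching_letters_in_blank_spaces_alt (actual_word : String) (guess_word : String) (letter : String) : String × Int :=
  let t := pvFillLoopB letter actual_word.toList guess_word.toList [] 0
  (String.mk (t.1 ++ t.2.1), t.2.2)

-- ===== PRECONDITION & SPEC =====
-- Pre_ excludes exactly the inputs on which Python A raises IndexError (the guessed letter matches at
-- some position i whose blank index i*2 is past the end of guess_word); Python B returns a value there.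
def Pre_fill_matching_letters_in_blank_spaces (actual_word : String) (guess_word : String) (letter : String) : Prop :=
  ∀ i < actual_word.toList.length, letter.toList = [actual_word.toList.getD i ' '] → i*2 < guess_word.toList.length
instance (actual_word : String) (guess_word : String) (letter : String) : Decidable (Pre_fill_matching_letters_in_blank_spaces actual_word guess_word letter) := by unfold Pre_fill_matching_letters_in_blank_spaces; infer_instance
def pvWitness_fill_matching_letters_in_blank_spaces : String × String × String := ("cat", "_ _ _ ", "a")

def Spec_fill_matching_letters_in_blank_spaces (actual_word : String) (guess_word : String) (letter : String) (out : String × Int) : Prop := out = fill_matching_letters_in_blank_spaces_alt actual_word guess_word letter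
instance (actual_word : String) (guess_word : String) (letter : String) (out : String × Int) : Decidable (Spec_fill_matching_letters_in_blank_spaces actual_word guess_word letter out) := by unfold Spec_fill_matching_letters_in_blank_spaces; infer_instance

-- ===== CLAIM (what is proved, stated in full; the proofs are below) =====
def Claim_equal_fill_matching_letters_in_blank_spaces : Prop := ∀ (actual_word : String) (guess_word : String) (letter : String), Dom_fill_matching_letters_in_blank_spaces actual_word guess_word letter → Pre_fill_matching_letters_in_blank_spaces actual_word guess_word letter → Spec_fill_matching_letters_in_blank_spaces actual_word guess_word letter (fill_matching_letters_in_blank_spaces actual_word guess_word letter)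

-- ===== LEMMAS AND PROOFS =====
-- B's loop with pieces/count accumulators, expressed from the empty accumulators.
lemma pvFillLoopB_acc (letter : String) :
    ∀ (aws gw p : List Char) (n : Int),
      pvFillLoopB letter aws gw p n =
        ((p ++ (pvFillLoopB letter aws gw [] 0).1),
         (pvFillLoopB letter aws gw [] 0).2.1,
         n + (pvFillLoopB letter aws gw [] 0).2.2) := by
  intro aws
  induction aws with
  | nil => intro gw p n; simp [pvFillLoopB]
  | cons ch aws ih =>
      intro gw p n
      cases gw with
      | nil => simp [pvFillLoopB]
      | cons g0 gt =>
          by_cases hc : letter.toList = [ch] ∧ g0 = '_'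
          · cases gt with
            | nil =>
                simp only [pvFillLoopB, if_pos hc]
                rw [ih [] (p ++ letter.toList), ih [] ([] ++ letter.toList)]
                refine Prod.ext ?_ (Prod.ext ?_ ?_) <;> simp [List.append_assoc] <;> omega
            | cons g1 rest =>
                simp only [pvFillLoopB, if_pos hc]
                rw [ih rest ((p ++ letter.toList) ++ [g1]), ih rest (([] ++ letter.toList) ++ [g1])]
                refine Prod.ext ?_ (Prod.ext ?_ ?_) <;> simp [List.append_assoc] <;> omega
          · cases gt with
            | nil =>
                simp only [pvFillLoopB, if_neg hc]
                rw [ih [] (p ++ [g0]), ih [] ([] ++ [g0])]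
                refine Prod.ext ?_ (Prod.ext ?_ ?_) <;> simp [List.append_assoc] <;> omega
            | cons g1 rest =>
                simp only [pvFillLoopB, if_neg hc]
                rw [ih rest ((p ++ [g0]) ++ [g1]), ih rest (([] ++ [g0]) ++ [g1])]
                refine Prod.ext ?_ (Prod.ext ?_ ?_) <;> simp [List.append_assoc] <;> omega
-- A's shifted fold is the identity when the remaining char list has length ≤ 2 (all reads are at index ≥ 2).
lemma shifted_fold_id (letter : String) (a : Char) (aws : List Char) :
    ∀ (idxs : List Nat) (g : List Char) (r : Int), g.length ≤ 2 →
      idxs.foldl (fun st i => pvFillStepA letter (a :: aws) st (i + 1)) (g, r) = (g, r) := by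
  intro idxs
  induction idxs with
  | nil => intro g r _; rfl
  | cons i rest ih =>
      intro g r hg
      have hge : g.length ≤ (i + 1) * 2 := by omega
      have hd : g.getD ((i + 1) * 2) ' ' = ' ' := List.getD_eq_default _ _ hge
      have hstep : pvFillStepA letter (a :: aws) (g, r) (i + 1) = (g, r) := by
        unfold pvFillStepA
        rw [show ((g, r) : List Char × Int).1 = g from rfl, hd]
        simp
      rw [List.foldl_cons, hstep, ih g r hg]

-- Shifting A's fold past a two-char prefix: reads/writes at (i+1)*2 on g0::g1::g'' are reads/writes at i*2 on g''.
lemma shifted_fold_cons2 (letter : String) (a : Char) (aws : List Char) :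
    ∀ (idxs : List Nat) (g0 g1 : Char) (g'' : List Char) (r : Int),
      idxs.foldl (fun st i => pvFillStepA letter (a :: aws) st (i + 1)) (g0 :: g1 :: g'', r) =
        (g0 :: g1 :: (idxs.foldl (pvFillStepA letter aws) (g'', r)).1,
         (idxs.foldl (pvFillStepA letter aws) (g'', r)).2) := by
  intro idxs
  induction idxs with
  | nil => intro g0 g1 g'' r; rfl
  | cons i rest ih =>
      intro g0 g1 g'' r
      have h2 : (i + 1) * 2 = i * 2 + 1 + 1 := by ring
      have hgetA : (a :: aws).getD (i + 1) ' ' = aws.getD i ' ' := List.getD_cons_succ ..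
      have hgetG : (g0 :: g1 :: g'').getD ((i + 1) * 2) ' ' = g''.getD (i * 2) ' ' := by
        rw [h2, List.getD_cons_succ, List.getD_cons_succ]
      have hset : (g0 :: g1 :: g'').set ((i + 1) * 2) (letter.toList.headD ' ') =
          g0 :: g1 :: g''.set (i * 2) (letter.toList.headD ' ') := by
        rw [h2]; rfl
      rw [List.foldl_cons, List.foldl_cons]
      unfold pvFillStepA
      rw [show ((g0 :: g1 :: g'', r) : List Char × Int).1 = g0 :: g1 :: g'' from rfl,
          show ((g'', r) : List Char × Int).1 = g'' from rfl, hgetA, hgetG, hset]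
      by_cases hc : letter.toList = [aws.getD i ' '] ∧ g''.getD (i * 2) ' ' = '_'
      · rw [if_pos hc, if_pos hc]; exact ih ..
      · rw [if_neg hc, if_neg hc]; exact ih ..

-- B's loop returns (pieces, [], n) when the guess iterator is exhausted.
lemma pvFillLoopB_nil (letter : String) : ∀ (l p : List Char) (n : Int),
    pvFillLoopB letter l [] p n = (p, [], n) := by
  intro l p n; cases l <;> rfl

-- Main invariant: A's range fold equals B's streaming loop (pieces ++ leftover, shifted count).
lemma fold_eq_loop (letter : String) :
    ∀ (actual gw : List Char) (r : Int),
      (List.range actual.length).foldl (pvFillStepA letter actual) (gw, r) =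
        ((pvFillLoopB letter actual gw [] 0).1 ++ (pvFillLoopB letter actual gw [] 0).2.1,
         r + (pvFillLoopB letter actual gw [] 0).2.2) := by
  intro actual
  induction actual with
  | nil => intro gw r; simp [pvFillLoopB]
  | cons a aws ih =>
      intro gw r
      rw [List.length_cons, List.range_succ_eq_map, List.foldl_cons, List.foldl_map]
      match gw with
      | [] =>
          have hstep : pvFillStepA letter (a :: aws) (([] : List Char), r) 0 = ([], r) := by
            unfold pvFillStepA; simp
          rw [hstep, shifted_fold_id letter a aws _ [] r (by simp)]
          simp [pvFillLoopB]
      | g0 :: gt =>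
          have hget0 : (g0 :: gt).getD 0 ' ' = g0 := rfl
          by_cases hc : letter.toList = [a] ∧ g0 = '_'
          · -- filled: the written char is the letter's single char, = letter.toList as a piece
            have hlet : letter.toList.headD ' ' = a := by rw [hc.1]; rfl
            have hstep : pvFillStepA letter (a :: aws) ((g0 :: gt), r) 0 =
                (letter.toList.headD ' ' :: gt, r + 1) := by
              unfold pvFillStepA
              rw [show ((g0 :: gt, r) : List Char × Int).1 = g0 :: gt from rfl, hget0,
                  Nat.zero_mul, if_pos (by simpa [hget0] using hc)]
              rfl
            rw [hstep]
            match gt with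
            | [] =>
                rw [shifted_fold_id letter a aws _ _ _ (by simp)]
                simp only [pvFillLoopB, if_pos hc]
                rw [pvFillLoopB_acc letter aws [] (([] ++ letter.toList)) (0 + 1)]
                refine Prod.ext ?_ ?_ <;> simp [pvFillLoopB_nil, hlet, hc.1] <;> try omega
            | g1 :: rest =>
                rw [shifted_fold_cons2, ih rest (r + 1)]
                simp only [pvFillLoopB, if_pos hc]
                rw [pvFillLoopB_acc letter aws rest (([] ++ letter.toList) ++ [g1]) (0 + 1)]
                refine Prod.ext ?_ ?_ <;> simp [List.append_assoc, hlet, hc.1] <;> try omega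
          · have hstep : pvFillStepA letter (a :: aws) ((g0 :: gt), r) 0 = (g0 :: gt, r) := by
              unfold pvFillStepA
              rw [show ((g0 :: gt, r) : List Char × Int).1 = g0 :: gt from rfl, hget0,
                  Nat.zero_mul, if_neg (by simpa [hget0] using hc)]
            rw [hstep]
            match gt with
            | [] =>
                rw [shifted_fold_id letter a aws _ _ _ (by simp)]
                simp only [pvFillLoopB, if_neg hc]
                rw [pvFillLoopB_acc letter aws [] ([] ++ [g0]) 0]
                simp [pvFillLoopB_nil]
            | g1 :: rest =>
                rw [shifted_fold_cons2, ih rest r]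
                simp only [pvFillLoopB, if_neg hc]
                rw [pvFillLoopB_acc letter aws rest (([] ++ [g0]) ++ [g1]) 0]
                refine Prod.ext ?_ ?_ <;> simp [List.append_assoc] <;> try omega

-- ===== VERDICT (by name: the statement is the Claim_ definition above) =====
theorem fill_matching_letters_in_blank_spaces_spec : Claim_equal_fill_matching_letters_in_blank_spaces := by
  intro actual_word guess_word letter _ _
  unfold Spec_fill_matching_letters_in_blank_spaces
  unfold fill_matching_letters_in_blank_spaces fill_matching_letters_in_blank_spaces_alt
  rw [fold_eq_loop letter actual_word.toList guess_word.toList 0]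
  simp
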